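-- pv_equiv track=rewrite | github.com/ekzm8523/CodingTestPractice | python/samsung_tutorial/basic_algorithm/2143.py | find_comb
-- ===== SOURCE A (Python) =====
-- def find_comb(sequence, size, max_value):
--     prefix_seq = [0]
--     for i in range(size):
--         prefix_seq.append(prefix_seq[i] + sequence[i])
--     comb = {}
--
--     # comb = set()
--     left = 0
--     while left < size:
--         for right in range(left + 1, size + 1):
--             seq_sum = prefix_seq[right] - prefix_seq[left]
--             # if seq_sum < max_value:
--             if seq_sum in comb:
--                 comb[seq_sum] += 1
--             else:
--                 comb[seq_sum] = 1
--
--         left += 1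
--     return comb
-- ===== SOURCE B (Python) =====
-- def find_comb(sequence, size, max_value):
--     comb = {}
--     for left in range(size):
--         s = 0
--         for right in range(left, size):
--             s += sequence[right]
--             comb[s] = comb.get(s, 0) + 1
--     return comb
-- ===== Notes on version B (the rewrite author's own statement) =====
-- stated objective: simpler
-- what changed: B drops A's precomputed prefix-sum table and the index-differencing prefix[right]-prefix[left]: it accumulates each subarray sum directly with a running sum reset per left index and counts with dict.get, producing the same counts in the same insertion order.
import Mathlib
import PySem

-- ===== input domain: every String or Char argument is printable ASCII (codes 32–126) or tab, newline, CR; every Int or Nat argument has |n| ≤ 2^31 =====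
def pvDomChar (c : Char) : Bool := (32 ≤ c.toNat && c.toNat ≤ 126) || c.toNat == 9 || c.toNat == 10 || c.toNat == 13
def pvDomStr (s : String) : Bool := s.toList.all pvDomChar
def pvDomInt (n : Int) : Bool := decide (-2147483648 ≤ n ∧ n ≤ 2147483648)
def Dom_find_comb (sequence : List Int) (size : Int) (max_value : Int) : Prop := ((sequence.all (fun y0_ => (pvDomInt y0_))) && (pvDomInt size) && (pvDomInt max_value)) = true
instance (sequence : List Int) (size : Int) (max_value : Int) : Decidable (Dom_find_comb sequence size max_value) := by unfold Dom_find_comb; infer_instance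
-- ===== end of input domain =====

-- B drops A's prefix-sum table and index-differencing in favour of a per-left running sum (same counts, same order): simpler.


-- ===== PORT A =====
def find_comb (sequence : List Int) (size : Int) (max_value : Int) : List (Int × Int) :=
  -- prefix_seq = [0]; for i in range(size): prefix_seq.append(prefix_seq[i] + sequence[i])
  let prefix_seq : List Int :=
    (PySem.List.pyRange 0 size 1).foldl
      (fun p i => p ++ [PySem.List.pyGetD p i 0 + PySem.List.pyGetD sequence i 0]) [0]
  -- while left < size: for right in range(left+1, size+1): …  (left = 0, 1, …)
  let comb : PySem.Dict Int Int :=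
    (PySem.List.pyRange 0 size 1).foldl
      (fun comb left =>
        (PySem.List.pyRange (left + 1) (size + 1) 1).foldl
          (fun comb right =>
            let seq_sum := PySem.List.pyGetD prefix_seq right 0 - PySem.List.pyGetD prefix_seq left 0
            if comb.contains seq_sum then comb.modify seq_sum 0 (· + 1)
            else comb.insert seq_sum 1)
          comb)
      PySem.Dict.empty
  comb.items

-- ===== PORT B =====
def find_comb_alt (sequence : List Int) (size : Int) (max_value : Int) : List (Int × Int) :=
  let comb : PySem.Dict Int Int :=
    (PySem.List.pyRange 0 size 1).foldl
      (fun comb left =>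
        ((PySem.List.pyRange left size 1).foldl
          (fun (st : PySem.Dict Int Int × Int) right =>
            let s := st.2 + PySem.List.pyGetD sequence right 0
            (st.1.insert s (st.1.getD s 0 + 1), s))
          (comb, 0)).1)
      PySem.Dict.empty
  comb.items

-- ===== PRECONDITION & SPEC =====
-- A indexes sequence[i] for i in range(size): it raises IndexError iff size > len(sequence).
def Pre_find_comb (sequence : List Int) (size : Int) (max_value : Int) : Prop :=
  size ≤ (sequence.length : Int)
instance (sequence : List Int) (size : Int) (max_value : Int) : Decidable (Pre_find_comb sequence size max_value) := by unfold Pre_find_comb; infer_instance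
def pvWitness_find_comb : List Int × Int × Int := ([1, -2, 1], 3, 10)

def Spec_find_comb (sequence : List Int) (size : Int) (max_value : Int) (out : List (Int × Int)) : Prop := out = find_comb_alt sequence size max_value
instance (sequence : List Int) (size : Int) (max_value : Int) (out : List (Int × Int)) : Decidable (Spec_find_comb sequence size max_value out) := by unfold Spec_find_comb; infer_instance

-- ===== CLAIM (what is proved, stated in full; the proofs are below) =====
def Claim_equal_find_comb : Prop := ∀ (sequence : List Int) (size : Int) (max_value : Int), Dom_find_comb sequence size max_value → Pre_find_comb sequence size max_value → Spec_find_comb sequence size max_value (find_comb sequence size max_value)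

-- ===== LEMMAS AND PROOFS =====

-- pf i = sum of the first i elements (the mathematical prefix sum both programs realise)
def pvPf (sequence : List Int) (i : Int) : Int := (sequence.take i.toNat).sum

-- one counting step in normalised form
def pvStep (c : PySem.Dict Int Int) (m : Int) : PySem.Dict Int Int := c.insert m (c.getD m 0 + 1)

-- A's counting step equals the normalised step, dict for dict
theorem pvStep_eq (c : PySem.Dict Int Int) (s : Int) :
    (if c.contains s then c.modify s 0 (· + 1) else c.insert s 1) = pvStep c s := by
  unfold pvStep
  by_cases h : c.contains s
  · simp [h, PySem.Dict.modify, PySem.Dict.insert, PySem.Dict.getD]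
  · rw [if_neg (by simp [h]), PySem.Dict.getD_of_not_contains c 0 (by simpa using h), zero_add]

theorem pvPf_succ (sequence : List Int) (n : Nat) (hn : n < sequence.length) :
    pvPf sequence ((n : Int) + 1) = pvPf sequence n + sequence[n] := by
  simp only [pvPf]
  have h1 : ((n : Int) + 1).toNat = n + 1 := by omega
  have h2 : ((n : Int)).toNat = n := by omega
  rw [h1, h2, List.take_add_one, List.sum_append]
  simp [List.getElem?_eq_getElem hn]

-- A's prefix_seq is the map of pvPf over 0..n
theorem pvPrefix_build (sequence : List Int) (n : Nat) (hn : (n : Int) ≤ (sequence.length : Int)) :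
    (PySem.List.pyRange 0 (n : Int) 1).foldl
      (fun p i => p ++ [PySem.List.pyGetD p i 0 + PySem.List.pyGetD sequence i 0]) [0]
    = (List.range (n + 1)).map (fun k : Nat => pvPf sequence (k : Int)) := by
  induction n with
  | zero => simp [PySem.List.pyRange_one_eq_nil, pvPf]
  | succ m ih =>
    have hm : (m : Int) ≤ (sequence.length : Int) := by push_cast at hn ⊢; omega
    have hcast : ((m + 1 : Nat) : Int) = (m : Int) + 1 := by push_cast; ring
    rw [hcast, PySem.List.pyRange_one_succ_right (show (0:Int) ≤ (m:Int) by omega), List.foldl_append, ih hm]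
    have hget1 : PySem.List.pyGetD ((List.range (m + 1)).map (fun k : Nat => pvPf sequence (k : Int))) (m : Int) 0
        = pvPf sequence (m : Int) := by
      rw [PySem.List.pyGetD_eq_getElem _ _ (by omega) (by rw [List.length_map, List.length_range]; omega)]
      simp
    have hmlt : m < sequence.length := by push_cast at hn; omega
    have hget2 : PySem.List.pyGetD sequence (m : Int) 0 = sequence[m] := by
      rw [PySem.List.pyGetD_eq_getElem _ _ (by omega) (by push_cast; omega)]
      simp
    simp only [List.foldl_cons, List.foldl_nil, hget1, hget2]
    rw [show List.range (m + 1 + 1) = List.range (m + 1) ++ [m + 1] from List.range_succ,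
        List.map_append, List.map_singleton, hcast, pvPf_succ sequence m hmlt]

-- lookup in the built prefix list
theorem pvPrefix_get (sequence : List Int) (n : Nat) (i : Int) (h0 : 0 ≤ i) (hi : i ≤ (n : Int)) :
    PySem.List.pyGetD ((List.range (n + 1)).map (fun k : Nat => pvPf sequence (k : Int))) i 0
      = pvPf sequence i := by
  rw [PySem.List.pyGetD_eq_getElem _ _ h0 (by rw [List.length_map, List.length_range]; omega)]
  rw [List.getElem_map, List.getElem_range]
  congr 1
  omega

-- inner loops agree: B's running sum at index a is pvPf a - pvPf left
theorem pvInner_eq (sequence : List Int) (size left : Int)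
    (hsz : size ≤ (sequence.length : Int)) (hl0 : 0 ≤ left) :
    ∀ (k : Nat) (a : Int), a = size - (k : Int) → left ≤ a →
    ∀ (c : PySem.Dict Int Int) (s : Int), s = pvPf sequence a - pvPf sequence left →
    ((PySem.List.pyRange a size 1).foldl
        (fun (st : PySem.Dict Int Int × Int) right =>
          let s := st.2 + PySem.List.pyGetD sequence right 0
          (st.1.insert s (st.1.getD s 0 + 1), s))
        (c, s)).1
    = (PySem.List.pyRange (a + 1) (size + 1) 1).foldl
        (fun comb right => pvStep comb (pvPf sequence right - pvPf sequence left))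
        c := by
  intro k
  induction k with
  | zero =>
    intro a ha _ c s _
    rw [PySem.List.pyRange_one_eq_nil (by omega), PySem.List.pyRange_one_eq_nil (by omega)]
    rfl
  | succ m ih =>
    intro a ha hla c s hs
    by_cases hend : size ≤ a
    · rw [PySem.List.pyRange_one_eq_nil (by omega), PySem.List.pyRange_one_eq_nil (by omega)]
      rfl
    · push_neg at hend
      have ha0 : 0 ≤ a := le_trans hl0 hla
      have hanat : a.toNat < sequence.length := by omega
      have hseq : PySem.List.pyGetD sequence a 0 = sequence[a.toNat] := by
        rw [PySem.List.pyGetD_eq_getElem _ _ ha0 (by omega)]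
      have hpfsucc : pvPf sequence (a + 1) = pvPf sequence a + sequence[a.toNat] := by
        have := pvPf_succ sequence a.toNat hanat
        rwa [show ((a.toNat : Nat) : Int) = a by omega] at this
      rw [PySem.List.pyRange_one_cons hend, PySem.List.pyRange_one_cons (show a + 1 < size + 1 by omega)]
      simp only [List.foldl_cons]
      have hsum : s + PySem.List.pyGetD sequence a 0
          = pvPf sequence (a + 1) - pvPf sequence left := by
        rw [hseq, hs, hpfsucc]; ring
      rw [hsum]
      exact ih (a + 1) (by omega) (by omega) _ _ rfl

-- ===== VERDICT (by name: the statement is the Claim_ definition above) =====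
theorem find_comb_spec : Claim_equal_find_comb := by
  intro sequence size max_value _ hpre
  unfold Pre_find_comb at hpre
  unfold Spec_find_comb find_comb find_comb_alt
  by_cases hneg : size ≤ 0
  · rw [PySem.List.pyRange_one_eq_nil hneg]
    rfl
  · push_neg at hneg
    refine congrArg PySem.Dict.items ?_
    have hpb := pvPrefix_build sequence size.toNat (by omega)
    rw [show ((size.toNat : Nat) : Int) = size by omega] at hpb
    rw [hpb]
    apply PySem.List.foldl_congr_mem
    intro c left hmem
    rw [PySem.List.mem_pyRange_one] at hmem
    have hN : (PySem.List.pyRange (left + 1) (size + 1) 1).foldl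
        (fun comb right =>
          let seq_sum := PySem.List.pyGetD ((List.range (size.toNat + 1)).map (fun k : Nat => pvPf sequence (k : Int))) right 0
              - PySem.List.pyGetD ((List.range (size.toNat + 1)).map (fun k : Nat => pvPf sequence (k : Int))) left 0
          if comb.contains seq_sum then comb.modify seq_sum 0 (· + 1)
          else comb.insert seq_sum 1)
        c
        = (PySem.List.pyRange (left + 1) (size + 1) 1).foldl
            (fun comb right => pvStep comb (pvPf sequence right - pvPf sequence left)) c := by
      apply PySem.List.foldl_congr_mem
      intro acc r hr
      rw [PySem.List.mem_pyRange_one] at hr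
      have hgr := pvPrefix_get sequence size.toNat r (by omega) (by omega)
      have hgl := pvPrefix_get sequence size.toNat left (by omega) (by omega)
      simp only [hgr, hgl]
      exact pvStep_eq acc _
    have hI := pvInner_eq sequence size left hpre hmem.1 (size - left).toNat left
      (by omega) le_rfl c 0 (by rw [sub_self])
    exact hN.trans hI.symm
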